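-- pv_equiv track=rewrite | github.com/tamastheactual/hackaton | OITM2025/Nyelvfüggetlen Programozás/4/3_feladat/advanced_break.py | analyze_position
-- ===== SOURCE A (Python) =====
-- from collections import Counter
--
-- def analyze_position(encoded_text, position):
--     letters = []
--     idx = 0
--     for char in encoded_text:
--         if char.isalpha():
--             if idx % 7 == position:
--                 letters.append(char.lower())
--             idx += 1
--     return Counter(letters)
-- ===== SOURCE B (Python) =====
-- from collections import Counter
--
-- def analyze_position(encoded_text, position):
--     letters = [c.lower() for c in encoded_text if c.isalpha()]
--     if 0 <= position < 7:
--         return Counter(letters[position::7])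
--     return Counter()
-- ===== Notes on version B (the rewrite author's own statement) =====
-- stated objective: simpler
-- what changed: Replaces the single loop with a manual modular index counter by a two-phase build-then-slice shape: collect the lowercased alphabetic characters once, then take the stride slice letters[position::7] (empty Counter when position is outside 0..6, since idx % 7 never equals it).
import Mathlib
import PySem

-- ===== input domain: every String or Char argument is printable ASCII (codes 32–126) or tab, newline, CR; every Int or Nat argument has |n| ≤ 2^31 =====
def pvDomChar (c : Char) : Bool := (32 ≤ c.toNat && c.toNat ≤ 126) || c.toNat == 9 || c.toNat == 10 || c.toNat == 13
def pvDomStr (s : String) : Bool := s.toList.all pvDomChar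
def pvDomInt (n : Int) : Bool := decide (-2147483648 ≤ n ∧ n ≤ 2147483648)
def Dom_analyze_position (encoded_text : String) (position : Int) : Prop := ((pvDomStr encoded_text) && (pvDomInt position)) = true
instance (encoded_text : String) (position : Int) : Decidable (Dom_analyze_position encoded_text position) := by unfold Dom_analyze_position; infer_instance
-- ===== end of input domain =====

-- B replaces A's single loop with a per-letter modular index by a two-phase build-then-slice
-- decomposition (collect lowered alphabetic chars, then take the stride slice); objective: simpler.

-- ===== PORT A =====
-- char.lower() on a one-character string is String.mk [lowerChar c] (exact on ASCII code points).
def analyze_position (encoded_text : String) (position : Int) : List (String × Int) :=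
  let r := encoded_text.toList.foldl
    (fun (s : List String × Int) c =>
      if PySem.Chars.isalpha c then
        (if PySem.Int.mod s.2 7 == position then s.1 ++ [String.mk [PySem.Chars.lowerChar c]] else s.1,
         s.2 + 1)
      else s)
    ([], 0)
  (PySem.Dict.counter r.1).items

-- ===== PORT B =====
-- hand port of the stride slice letters[position::7] (exact: the guard ensures 0 ≤ position < 7,
-- where Python's slicing is drop-then-every-7th).
def pvEvery7 : List String → List String
  | [] => []
  | x :: xs => x :: pvEvery7 (xs.drop 6)
termination_by l => l.length
decreasing_by simp

def analyze_position_alt (encoded_text : String) (position : Int) : List (String × Int) :=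
  let letters := (encoded_text.toList.filter PySem.Chars.isalpha).map
      (fun c => String.mk [PySem.Chars.lowerChar c])
  if 0 ≤ position ∧ position < 7 then
    (PySem.Dict.counter (pvEvery7 (letters.drop position.toNat))).items
  else
    (PySem.Dict.empty : PySem.Dict String Int).items

-- ===== PRECONDITION & SPEC =====
def Spec_analyze_position (encoded_text : String) (position : Int) (out : List (String × Int)) : Prop := out = analyze_position_alt encoded_text position
instance (encoded_text : String) (position : Int) (out : List (String × Int)) : Decidable (Spec_analyze_position encoded_text position out) := by unfold Spec_analyze_position; infer_instance

-- ===== CLAIM (what is proved, stated in full; the proofs are below) =====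
def Claim_equal_analyze_position : Prop := ∀ (encoded_text : String) (position : Int), Dom_analyze_position encoded_text position → Spec_analyze_position encoded_text position (analyze_position encoded_text position)

-- ===== LEMMAS AND PROOFS =====

-- the letters A's loop collects, indexed by the running alpha counter n
def pvSelA (position : Int) : List Char → Nat → List String
  | [], _ => []
  | c :: cs, n =>
    if PySem.Chars.isalpha c then
      (if PySem.Int.mod (n : Int) 7 == position then [String.mk [PySem.Chars.lowerChar c]] else [])
        ++ pvSelA position cs (n + 1)
    else pvSelA position cs n

theorem pvFoldA (position : Int) (cs : List Char) :
    ∀ (acc : List String) (n : Nat),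
    cs.foldl
      (fun (s : List String × Int) c =>
        if PySem.Chars.isalpha c then
          (if PySem.Int.mod s.2 7 == position then s.1 ++ [String.mk [PySem.Chars.lowerChar c]] else s.1,
           s.2 + 1)
        else s)
      (acc, (n : Int))
      = (acc ++ pvSelA position cs n, ((n + (cs.filter PySem.Chars.isalpha).length : Nat) : Int)) := by
  induction cs with
  | nil => intro acc n; simp [pvSelA]
  | cons c cs ih =>
    intro acc n
    by_cases hc : PySem.Chars.isalpha c
    · have hcast : ((n : Int) + 1) = ((n + 1 : Nat) : Int) := by push_cast; ring
      have hmod : PySem.Int.mod (n : Int) 7 = (n : Int) % 7 :=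
        PySem.Int.mod_eq_emod_of_pos (by omega)
      by_cases hm : PySem.Int.mod (n : Int) 7 == position
      · rw [hmod, beq_iff_eq] at hm
        simp only [List.foldl_cons, hc, if_true, hmod, hm, beq_self_eq_true]
        rw [hcast, ih]
        refine Prod.ext ?_ ?_
        · simp [pvSelA, hc, hm, List.append_assoc]
        · simp only [List.filter_cons, hc, if_true, List.length_cons]
          push_cast
          ring
      · rw [hmod] at hm
        simp only [List.foldl_cons, hc, if_true, hmod, hm, Bool.false_eq_true, if_false]
        rw [hcast, ih]
        refine Prod.ext ?_ ?_
        · simp only [beq_iff_eq] at hm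
          simp [pvSelA, hc, hm]
        · simp only [List.filter_cons, hc, if_true, List.length_cons]
          push_cast
          ring
    · simp only [List.foldl_cons, hc, if_false, Bool.false_eq_true]
      rw [ih]
      simp [pvSelA, hc]

-- selection on the already-filtered-and-lowered list
def pvSelN (p : Nat) : List String → Nat → List String
  | [], _ => []
  | x :: xs, n => (if n % 7 = p then [x] else []) ++ pvSelN p xs (n + 1)

theorem pvSelA_eq_selN (p : Nat) (cs : List Char) :
    ∀ n, pvSelA (p : Int) cs n
      = pvSelN p ((cs.filter PySem.Chars.isalpha).map (fun c => String.mk [PySem.Chars.lowerChar c])) n := by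
  induction cs with
  | nil => intro n; simp [pvSelA, pvSelN]
  | cons c cs ih =>
    intro n
    by_cases hc : PySem.Chars.isalpha c
    · have hmod : PySem.Int.mod (n : Int) 7 = ((n % 7 : Nat) : Int) := by
        exact_mod_cast PySem.Int.mod_natCast n 7
      by_cases hm : n % 7 = p
      · have hcc : ((n : Int) % 7 = (p : Int)) := by omega
        simp [pvSelA, pvSelN, hc, hm, hcc, ih]
      · have hcc : ¬ ((n : Int) % 7 = (p : Int)) := by omega
        simp [pvSelA, pvSelN, hc, hm, hcc, ih]
    · simp [pvSelA, hc, ih]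

@[simp] theorem pvEvery7_nil : pvEvery7 [] = [] := by rw [pvEvery7]

theorem pvEvery7_cons (x : String) (xs : List String) :
    pvEvery7 (x :: xs) = x :: pvEvery7 (xs.drop 6) := by rw [pvEvery7]

theorem pvSelN_eq_every7 (p : Nat) (hp : p < 7) (l : List String) :
    ∀ n, pvSelN p l n = pvEvery7 (l.drop ((p + 7 - n % 7) % 7)) := by
  induction l with
  | nil => intro n; simp [pvSelN]
  | cons x xs ih =>
    intro n
    by_cases hm : n % 7 = p
    · have hd : (p + 7 - n % 7) % 7 = 0 := by omega
      have hd' : (p + 7 - (n + 1) % 7) % 7 = 6 := by omega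
      rw [show pvSelN p (x :: xs) n = (if n % 7 = p then [x] else []) ++ pvSelN p xs (n + 1) from rfl,
        if_pos hm, ih, hd, hd', List.drop_zero, pvEvery7_cons]
      rfl
    · have hd : 0 < (p + 7 - n % 7) % 7 := by omega
      obtain ⟨k, hk⟩ : ∃ k, (p + 7 - n % 7) % 7 = k + 1 := ⟨_, (Nat.succ_pred_eq_of_pos hd).symm⟩
      have hd' : (p + 7 - (n + 1) % 7) % 7 = k := by omega
      rw [show pvSelN p (x :: xs) n = (if n % 7 = p then [x] else []) ++ pvSelN p xs (n + 1) from rfl,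
        if_neg hm, List.nil_append, ih, hd', hk, List.drop_succ_cons]

theorem pvSelA_nil_of_out (position : Int) (h : ¬ (0 ≤ position ∧ position < 7)) (cs : List Char) :
    ∀ n, pvSelA position cs n = [] := by
  induction cs with
  | nil => intro n; simp [pvSelA]
  | cons c cs ih =>
    intro n
    by_cases hc : PySem.Chars.isalpha c
    · have hcc : ¬ ((n : Int) % 7 = position) := by omega
      simp [pvSelA, hc, hcc, ih]
    · simp [pvSelA, hc, ih]

-- ===== VERDICT (by name: the statement is the Claim_ definition above) =====
theorem analyze_position_spec : Claim_equal_analyze_position := by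
  intro t position _
  unfold Spec_analyze_position analyze_position analyze_position_alt
  have hfold := pvFoldA position t.toList [] 0
  simp only [Nat.cast_zero] at hfold
  rw [hfold]
  by_cases h : 0 ≤ position ∧ position < 7
  · obtain ⟨h0, h7⟩ := h
    obtain ⟨p, rfl⟩ : ∃ p : Nat, position = (p : Int) := ⟨position.toNat, (Int.toNat_of_nonneg h0).symm⟩
    have hp : p < 7 := by exact_mod_cast h7
    simp only [List.nil_append, if_pos (And.intro h0 h7), Int.toNat_natCast]
    rw [pvSelA_eq_selN, pvSelN_eq_every7 p hp]
    simp [Nat.mod_eq_of_lt hp]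
  · simp only [List.nil_append, if_neg h]
    rw [pvSelA_nil_of_out position h]
    rfl
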